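-- pv_equiv track=rewrite | github.com/dafyddstephenson/ucla-roms | mpc/passes/f77_to_f95.py | _fix_real
-- ===== SOURCE A (Python) =====
-- def _first_nonblank(text):
--     i = 0
--     while i < len(text) and text[i] in (" ", "\t"):
--         i += 1
--     return i
--
-- def _fix_real(text):
--     """
--     REAL*X → REAL(kind=X)
--     default REAL → REAL(kind=8)
--     REAL(kind=...) left unchanged
--     """
--     l = len(text)
--     istr = _first_nonblank(text)
--     if istr + 3 >= l:
--         return text
--
--     if text[istr:istr+4].lower() != "real":
--         return text
--
--     i = istr + 3
--     j = i + 1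
--
--     while j < l and text[j] == " ":
--         j += 1
--
--
--     # REAL*X  where X may be digits or a CPP macro (e.g. QUAD)
--     if j < l and text[j] == "*":
--         k = j + 1
--         # Accept any token up to comma, whitespace, or parenthesis.
--         while k < l and text[k] not in (" ", "\t", ",", ")"):
--             k += 1
--
--         size = text[j+1:k]
--         if size:
--             return text[:i+1] + f"(kind={size})" + text[k:]
--         return text
--
--     # REAL(...)
--     if j < l and text[j] == "(":
--         return text
--
--     # default REAL
--     is_default = (j > i+1) or j >= l or text[j] in (" ", ",")
--     if is_default:
--         return text[:i+1] + "(kind=8)" + text[i+1:]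
--
--     return text
-- ===== SOURCE B (Python) =====
-- def _fix_real(text):
--     """
--     REAL*X -> REAL(kind=X); default REAL -> REAL(kind=8); REAL(kind=...) unchanged.
--     Single-pass character-driven finite state machine (lead / kw / gap / tok / copy)
--     building the output incrementally, instead of index-cursor scans and slicing.
--     """
--     out, gap, tok = [], [], []
--     k = 0
--     state = "lead"
--     for c in text:
--         if state == "copy":
--             out.append(c)
--             continue
--         if state == "lead":
--             if c in " \t":
--                 out.append(c)
--                 continue
--             state = "kw"
--         if state == "kw":
--             if c.lower() != "real"[k]:
--                 return text
--             out.append(c)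
--             k += 1
--             if k == 4:
--                 state = "gap"
--             continue
--         if state == "gap":
--             if c == " ":
--                 gap.append(c)
--                 continue
--             if c == "*":
--                 state = "tok"
--                 continue
--             if c == "(":
--                 return text
--             if gap or c == ",":
--                 out.append("(kind=8)")
--                 out.extend(gap)
--                 out.append(c)
--                 state = "copy"
--                 continue
--             return text
--         # state == "tok"
--         if c in " \t,)":
--             if not tok:
--                 return text
--             out.append("(kind=")
--             out.extend(tok)
--             out.append(")")
--             out.append(c)
--             state = "copy"
--             continue
--         tok.append(c)
--     # end of input
--     if state in ("lead", "kw"):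
--         return text
--     if state == "gap":
--         out.append("(kind=8)")
--         out.extend(gap)
--     elif state == "tok":
--         if not tok:
--             return text
--         out.append("(kind=")
--         out.extend(tok)
--         out.append(")")
--     return "".join(out)
-- ===== Notes on version B (the rewrite author's own statement) =====
-- stated objective: alternative
-- what changed: Replaced A's multi-cursor index scan (separate i/j/k while-loops plus slicing of the original string) with a single character-driven finite state machine (states lead/kw/gap/tok/copy) that consumes the line once and builds the output incrementally in the state.
import Mathlib
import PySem

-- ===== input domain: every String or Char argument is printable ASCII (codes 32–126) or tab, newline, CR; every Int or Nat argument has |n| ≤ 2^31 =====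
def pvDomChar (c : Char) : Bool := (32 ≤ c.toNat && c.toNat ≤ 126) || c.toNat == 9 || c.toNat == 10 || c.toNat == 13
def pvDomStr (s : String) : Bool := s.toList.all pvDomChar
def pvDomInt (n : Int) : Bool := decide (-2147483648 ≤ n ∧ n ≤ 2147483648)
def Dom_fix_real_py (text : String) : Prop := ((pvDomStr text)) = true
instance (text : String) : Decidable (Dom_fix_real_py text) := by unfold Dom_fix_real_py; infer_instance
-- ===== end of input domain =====

-- B replaces A's index-cursor scans and slicing with a single character-driven finite
-- state machine building the output incrementally; same cost, return values proved equal.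

-- ===== PORT A =====
-- while i < len(text) and text[i] in (" ", "\t"): i += 1   (index guarded by i < len, so getD is exact)
def pvFirstNonblank (cs : List Char) (i : Nat) : Nat :=
  if i < cs.length && (cs.getD i ' ' == ' ' || cs.getD i ' ' == '\t') then
    pvFirstNonblank cs (i + 1)
  else i
termination_by cs.length - i
decreasing_by simp_all; omega

-- while j < l and text[j] == " ": j += 1
def pvSkipSpaces (cs : List Char) (j : Nat) : Nat :=
  if j < cs.length && cs.getD j ' ' == ' ' then pvSkipSpaces cs (j + 1) else j
termination_by cs.length - j
decreasing_by simp_all; omega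

-- while k < l and text[k] not in (" ", "\t", ",", ")"): k += 1
def pvScanTok (cs : List Char) (k : Nat) : Nat :=
  if k < cs.length && !(cs.getD k ' ' == ' ' || cs.getD k ' ' == '\t' ||
                        cs.getD k ' ' == ',' || cs.getD k ' ' == ')') then
    pvScanTok cs (k + 1)
  else k
termination_by cs.length - k
decreasing_by simp_all; omega

def fix_real_py (text : String) : String :=
  let cs := text.toList
  let l := cs.length
  let istr := pvFirstNonblank cs 0
  if istr + 3 ≥ l then text
  else if PySem.Chars.lower (PySem.List.slice cs (some (istr : Int)) (some ((istr : Int) + 4))) ≠ "real".toList then text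
  else
    let i := istr + 3
    let j := pvSkipSpaces cs (i + 1)
    if j < l ∧ cs.getD j ' ' = '*' then
      let k := pvScanTok cs (j + 1)
      let size := PySem.List.slice cs (some ((j : Int) + 1)) (some (k : Int))
      if size ≠ [] then
        String.ofList (cs.take (i + 1) ++ "(kind=".toList ++ size ++ ")".toList ++ cs.drop k)
      else text
    else if j < l ∧ cs.getD j ' ' = '(' then text
    else if j > i + 1 ∨ j ≥ l ∨ cs.getD j ' ' = ' ' ∨ cs.getD j ' ' = ',' then
      String.ofList (cs.take (i + 1) ++ "(kind=8)".toList ++ cs.drop (i + 1))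
    else text

-- ===== PORT B =====
-- A finite state machine over the characters of the line: states lead / kw / gap / tok / copy,
-- one step per character, output accumulated in the state; 'return text' in Python = none here.
inductive PvState : Type
  | lead | kw | gap | tok | copy
deriving DecidableEq, Repr

structure PvSt where
  out : List Char
  gap : List Char
  tok : List Char
  k   : Nat
  st  : PvState
deriving DecidableEq, Repr

def pvIsBlank (c : Char) : Bool := c == ' ' || c == '\t'
def pvIsStop (c : Char) : Bool := c == ' ' || c == '\t' || c == ',' || c == ')'

def pvPat : List Char := ['r', 'e', 'a', 'l']   -- "real"[k] indexing

-- the keyword-matching step (python's fallthrough from the lead state lands here too)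
def pvStepKw (s : PvSt) (c : Char) : Option PvSt :=
  if PySem.Chars.lowerChar c ≠ pvPat.getD s.k ' ' then none
  else some ({ s with out := s.out ++ [c], k := s.k + 1, st := (if s.k + 1 = 4 then PvState.gap else PvState.kw) })

def pvStep (s : PvSt) (c : Char) : Option PvSt :=
  match s.st with
  | .copy => some { s with out := s.out ++ [c] }
  | .lead =>
      if pvIsBlank c then some { s with out := s.out ++ [c] }
      else pvStepKw { s with st := .kw } c
  | .kw => pvStepKw s c
  | .gap =>
      if c == ' ' then some { s with gap := s.gap ++ [c] }
      else if c == '*' then some { s with st := .tok }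
      else if c == '(' then none
      else if !s.gap.isEmpty || c == ',' then
        some { s with out := s.out ++ "(kind=8)".toList ++ s.gap ++ [c], st := .copy }
      else none
  | .tok =>
      if pvIsStop c then
        if s.tok.isEmpty then none
        else some { s with out := s.out ++ "(kind=".toList ++ s.tok ++ [')'] ++ [c], st := .copy }
      else some { s with tok := s.tok ++ [c] }

def pvRun (s : PvSt) : List Char → Option PvSt
  | [] => some s
  | c :: tl =>
      match pvStep s c with
      | none => none
      | some s' => pvRun s' tl

-- the code after the loop
def pvFinish (text : String) (r : Option PvSt) : String :=
  match r with
  | none => text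
  | some s =>
    match s.st with
    | .lead => text
    | .kw => text
    | .gap => String.ofList (s.out ++ "(kind=8)".toList ++ s.gap)
    | .tok => if s.tok.isEmpty then text
              else String.ofList (s.out ++ "(kind=".toList ++ s.tok ++ [')'])
    | .copy => String.ofList s.out

def fix_real_py_alt (text : String) : String :=
  pvFinish text (pvRun ⟨[], [], [], 0, .lead⟩ text.toList)

-- ===== PRECONDITION & SPEC =====
def Spec_fix_real_py (text : String) (out : String) : Prop := out = fix_real_py_alt text
instance (text : String) (out : String) : Decidable (Spec_fix_real_py text out) := by unfold Spec_fix_real_py; infer_instance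

-- ===== CLAIM (what is proved, stated in full; the proofs are below) =====
def Claim_equal_fix_real_py : Prop := ∀ (text : String), Dom_fix_real_py text → Spec_fix_real_py text (fix_real_py text)

-- ===== LEMMAS AND PROOFS =====

-- A's three cursor loops, characterised as takeWhile lengths
theorem fnb_eq (cs : List Char) (i : Nat) :
    pvFirstNonblank cs i = i + ((cs.drop i).takeWhile pvIsBlank).length := by
  have main : ∀ n i, cs.length - i ≤ n →
      pvFirstNonblank cs i = i + ((cs.drop i).takeWhile pvIsBlank).length := by
    intro n
    induction n with
    | zero =>
      intro i h
      have hge : ¬ i < cs.length := by omega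
      unfold pvFirstNonblank
      simp [hge, List.drop_eq_nil_of_le (by omega : cs.length ≤ i)]
    | succ n ih =>
      intro i h
      by_cases hi : i < cs.length
      · rw [List.drop_eq_getElem_cons hi]
        unfold pvFirstNonblank
        by_cases hb : pvIsBlank cs[i]
        · have hc : (i < cs.length && (cs.getD i ' ' == ' ' || cs.getD i ' ' == '\t')) = true := by
            simp [hi]; simpa [pvIsBlank] using hb
          rw [if_pos hc, ih (i+1) (by omega), List.takeWhile_cons, if_pos hb]
          simp; omega
        · have hc : ¬ (i < cs.length && (cs.getD i ' ' == ' ' || cs.getD i ' ' == '\t')) = true := by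
            simp [hi]; simpa [pvIsBlank] using hb
          rw [if_neg hc, List.takeWhile_cons, if_neg hb]
          simp
      · unfold pvFirstNonblank
        simp [hi, List.drop_eq_nil_of_le (by omega : cs.length ≤ i)]
  exact main cs.length i (by omega)

theorem skip_eq (cs : List Char) (j : Nat) :
    pvSkipSpaces cs j = j + ((cs.drop j).takeWhile (fun c => c == ' ')).length := by
  have main : ∀ n j, cs.length - j ≤ n →
      pvSkipSpaces cs j = j + ((cs.drop j).takeWhile (fun c => c == ' ')).length := by
    intro n
    induction n with
    | zero =>
      intro j h
      have hge : ¬ j < cs.length := by omega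
      unfold pvSkipSpaces
      simp [hge, List.drop_eq_nil_of_le (by omega : cs.length ≤ j)]
    | succ n ih =>
      intro j h
      by_cases hj : j < cs.length
      · rw [List.drop_eq_getElem_cons hj]
        unfold pvSkipSpaces
        by_cases hb : (cs[j] == ' ') = true
        · have hc : (j < cs.length && (cs.getD j ' ' == ' ')) = true := by
            simp [hj]; simpa using hb
          rw [if_pos hc, ih (j+1) (by omega), List.takeWhile_cons, if_pos hb]
          simp; omega
        · have hc : ¬ (j < cs.length && (cs.getD j ' ' == ' ')) = true := by
            simp [hj]; simpa using hb
          rw [if_neg hc, List.takeWhile_cons, if_neg hb]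
          simp
      · unfold pvSkipSpaces
        simp [hj, List.drop_eq_nil_of_le (by omega : cs.length ≤ j)]
  exact main cs.length j (by omega)

theorem scan_eq (cs : List Char) (k : Nat) :
    pvScanTok cs k = k + ((cs.drop k).takeWhile (fun c => !pvIsStop c)).length := by
  have main : ∀ n k, cs.length - k ≤ n →
      pvScanTok cs k = k + ((cs.drop k).takeWhile (fun c => !pvIsStop c)).length := by
    intro n
    induction n with
    | zero =>
      intro k h
      have hge : ¬ k < cs.length := by omega
      unfold pvScanTok
      simp [hge, List.drop_eq_nil_of_le (by omega : cs.length ≤ k)]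
    | succ n ih =>
      intro k h
      by_cases hk : k < cs.length
      · rw [List.drop_eq_getElem_cons hk]
        unfold pvScanTok
        by_cases hb : (!pvIsStop cs[k]) = true
        · have hc : (k < cs.length && !(cs.getD k ' ' == ' ' || cs.getD k ' ' == '\t' ||
                        cs.getD k ' ' == ',' || cs.getD k ' ' == ')')) = true := by
            simp [hk]; simpa [pvIsStop] using hb
          rw [if_pos hc, ih (k+1) (by omega), List.takeWhile_cons, if_pos hb]
          simp; omega
        · have hc : ¬ (k < cs.length && !(cs.getD k ' ' == ' ' || cs.getD k ' ' == '\t' ||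
                        cs.getD k ' ' == ',' || cs.getD k ' ' == ')')) = true := by
            simp [hk]; simpa [pvIsStop] using hb
          rw [if_neg hc, List.takeWhile_cons, if_neg hb]
          simp
      · unfold pvScanTok
        simp [hk, List.drop_eq_nil_of_le (by omega : cs.length ≤ k)]
  exact main cs.length k (by omega)

theorem dropWhile_eq_drop (p : Char → Bool) (l : List Char) :
    l.dropWhile p = l.drop ((l.takeWhile p).length) := by
  induction l with
  | nil => rfl
  | cons a t ih => by_cases h : p a <;> simp [List.dropWhile_cons, List.takeWhile_cons, h, ih]

theorem take_takeWhile_len (p : Char → Bool) (l : List Char) :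
    l.take ((l.takeWhile p).length) = l.takeWhile p := by
  induction l with
  | nil => rfl
  | cons a t ih => by_cases h : p a <;> simp [List.takeWhile_cons, h, ih]

theorem takeWhile_length_le (p : Char → Bool) (l : List Char) :
    (l.takeWhile p).length ≤ l.length := by
  induction l with
  | nil => simp
  | cons a t ih => by_cases h : p a <;> simp [h] <;> omega

theorem getD_eq_headD_drop (l : List Char) (j : Nat) (d : Char) :
    l.getD j d = (l.drop j).headD d := by
  induction l generalizing j with
  | nil => simp
  | cons a t ih => cases j <;> simp [ih]

theorem headD_dropWhile_false (p : Char → Bool) (l : List Char) (h : l.dropWhile p ≠ []) :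
    p ((l.dropWhile p).headD ' ') = false := by
  induction l with
  | nil => simp at h
  | cons a t ih =>
    by_cases hp : p a
    · simpa [List.dropWhile_cons, hp] using ih (by simpa [List.dropWhile_cons, hp] using h)
    · simp [List.dropWhile_cons, hp]

-- the FSM's phases, characterised by takeWhile/dropWhile
theorem run_copy (cs : List Char) (o g t : List Char) (k : Nat) :
    pvRun ⟨o, g, t, k, .copy⟩ cs = some ⟨o ++ cs, g, t, k, .copy⟩ := by
  induction cs generalizing o with
  | nil => simp [pvRun]
  | cons c tl ih => simp [pvRun, pvStep, ih]

theorem run_lead (cs : List Char) (o g t : List Char) (k : Nat) :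
    pvRun ⟨o, g, t, k, .lead⟩ cs =
      pvRun ⟨o ++ cs.takeWhile pvIsBlank, g, t, k, .lead⟩ (cs.dropWhile pvIsBlank) := by
  induction cs generalizing o with
  | nil => simp
  | cons c tl ih =>
    by_cases h : pvIsBlank c
    · simp only [List.takeWhile_cons, List.dropWhile_cons, h, if_pos rfl]
      simpa [pvRun, pvStep, h] using ih (o ++ [c])
    · simp [List.takeWhile_cons, List.dropWhile_cons, h]

theorem run_gap (cs : List Char) (o g t : List Char) (k : Nat) :
    pvRun ⟨o, g, t, k, .gap⟩ cs =
      pvRun ⟨o, g ++ cs.takeWhile (fun c => c == ' '), t, k, .gap⟩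
        (cs.dropWhile (fun c => c == ' ')) := by
  induction cs generalizing g with
  | nil => simp
  | cons c tl ih =>
    by_cases h : (c == ' ') = true
    · simp only [List.takeWhile_cons, List.dropWhile_cons, h, if_pos rfl]
      simpa [pvRun, pvStep, h] using ih (g ++ [c])
    · simp [List.takeWhile_cons, List.dropWhile_cons, h]

theorem run_tok (cs : List Char) (o g t : List Char) (k : Nat) :
    pvRun ⟨o, g, t, k, .tok⟩ cs =
      pvRun ⟨o, g, t ++ cs.takeWhile (fun c => !pvIsStop c), k, .tok⟩
        (cs.dropWhile (fun c => !pvIsStop c)) := by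
  induction cs generalizing t with
  | nil => simp
  | cons c tl ih =>
    by_cases h : pvIsStop c
    · simp [List.takeWhile_cons, List.dropWhile_cons, h]
    · simp only [List.takeWhile_cons, List.dropWhile_cons, h, Bool.not_false, if_pos rfl]
      simpa [pvRun, pvStep, h] using ih (t ++ [c])

theorem run_kw4 (c1 c2 c3 c4 : Char) (tl : List Char) (o g t : List Char)
    (h1 : PySem.Chars.lowerChar c1 = 'r') (h2 : PySem.Chars.lowerChar c2 = 'e')
    (h3 : PySem.Chars.lowerChar c3 = 'a') (h4 : PySem.Chars.lowerChar c4 = 'l') :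
    pvRun ⟨o, g, t, 0, .kw⟩ (c1 :: c2 :: c3 :: c4 :: tl) =
      pvRun ⟨o ++ [c1, c2, c3, c4], g, t, 4, .gap⟩ tl := by
  simp [pvRun, pvStep, pvStepKw, pvPat, h1, h2, h3, h4]

-- ===== VERDICT (by name: the statement is the Claim_ definition above) =====
theorem fix_real_py_spec : Claim_equal_fix_real_py := by
  intro text _
  unfold Spec_fix_real_py
  show fix_real_py text = fix_real_py_alt text
  unfold fix_real_py fix_real_py_alt
  rw [run_lead]
  simp only [fnb_eq text.toList 0, List.drop_zero, Nat.zero_add, List.nil_append]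
  rw [dropWhile_eq_drop pvIsBlank text.toList]
  generalize text.toList = cs
  set lead := cs.takeWhile pvIsBlank with hlead
  set istr := lead.length with histr
  set rest := cs.drop istr with hrest
  have hle : istr ≤ cs.length := takeWhile_length_le _ _
  have hrl : rest.length = cs.length - istr := by rw [hrest]; simp
  have hhd0 : rest ≠ [] → pvIsBlank (rest.headD ' ') = false := by
    intro h
    rw [hrest, ← dropWhile_eq_drop] at h ⊢
    exact headD_dropWhile_false _ _ h
  by_cases hshort : istr + 3 ≥ cs.length
  · rw [if_pos hshort]
    rcases hr : rest with _ | ⟨a, _ | ⟨b, _ | ⟨d, _ | ⟨e, tl⟩⟩⟩⟩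
    · simp [pvRun, pvFinish]
    · have ha := hhd0 (by rw [hr]; simp); rw [hr] at ha; simp at ha
      by_cases h1 : PySem.Chars.lowerChar a = 'r' <;>
        simp [pvRun, pvStep, pvStepKw, pvFinish, pvPat, ha, h1]
    · have ha := hhd0 (by rw [hr]; simp); rw [hr] at ha; simp at ha
      by_cases h1 : PySem.Chars.lowerChar a = 'r' <;>
        by_cases h2 : PySem.Chars.lowerChar b = 'e' <;>
          simp [pvRun, pvStep, pvStepKw, pvFinish, pvPat, ha, h1, h2]
    · have ha := hhd0 (by rw [hr]; simp); rw [hr] at ha; simp at ha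
      by_cases h1 : PySem.Chars.lowerChar a = 'r' <;>
        by_cases h2 : PySem.Chars.lowerChar b = 'e' <;>
          by_cases h3 : PySem.Chars.lowerChar d = 'a' <;>
            simp [pvRun, pvStep, pvStepKw, pvFinish, pvPat, ha, h1, h2, h3]
    · exfalso
      have : rest.length = tl.length + 4 := by rw [hr]; simp
      omega
  · rw [if_neg hshort]
    push_neg at hshort
    rcases hr : rest with _ | ⟨c1, _ | ⟨c2, _ | ⟨c3, _ | ⟨c4, tl⟩⟩⟩⟩ <;>
      [skip; skip; skip; skip; skip] <;>
      first
        | (exfalso; rw [hr] at hrl; simp at hrl; omega)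
        | skip
    have ha := hhd0 (by rw [hr]; simp)
    rw [hr] at ha; simp only [List.headD_cons] at ha
    have hslice4 : PySem.List.slice cs (some (istr : Int)) (some ((istr : Int) + 4)) =
        [c1, c2, c3, c4] := by
      have h := PySem.List.slice_natCast (xs := cs) (a := istr) (b := istr + 4)
      push_cast at h
      rw [h, ← hrest, hr]
      simp
    rw [hslice4]
    have hreal4 : "real".toList = ['r', 'e', 'a', 'l'] := rfl
    by_cases hreal : PySem.Chars.lower [c1, c2, c3, c4] = "real".toList
    · rw [if_neg (not_not_intro hreal)]
      have hlc := hreal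
      rw [hreal4] at hlc
      simp only [PySem.Chars.lower, List.map_cons, List.map_nil, List.cons.injEq,
        and_true] at hlc
      obtain ⟨h1, h2, h3, h4⟩ := hlc
      have hstep1 : pvRun ⟨lead, [], [], 0, .lead⟩ (c1 :: c2 :: c3 :: c4 :: tl) =
          pvRun ⟨lead, [], [], 0, .kw⟩ (c1 :: c2 :: c3 :: c4 :: tl) := by
        simp [pvRun, pvStep, ha]
      rw [hstep1, run_kw4 _ _ _ _ _ _ _ _ h1 h2 h3 h4, run_gap]
      simp only [List.nil_append]
      rw [skip_eq cs (istr + 3 + 1)]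
      have e1 : istr + 3 + 1 = istr + 4 := rfl
      rw [e1]
      have hcl : cs.length = istr + 4 + tl.length := by
        rw [hr] at hrl; simp at hrl; omega
      have hdd4 : cs.drop (istr + 4) = tl := by
        have h4 : cs.drop (istr + 4) = (cs.drop istr).drop 4 := by
          rw [List.drop_drop]
        rw [h4, ← hrest, hr]
        rfl
      rw [hdd4]
      set gapc := tl.takeWhile (fun c => c == ' ') with hgapc
      set m := gapc.length with hm
      set body := tl.dropWhile (fun c => c == ' ') with hbodydef
      have hbody : body = tl.drop m := by
        rw [hbodydef, dropWhile_eq_drop]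
      have hmle : m ≤ tl.length := takeWhile_length_le _ _
      have hbl : body.length = tl.length - m := by rw [hbody]; simp
      have hbnil : body = [] ↔ tl.length ≤ m := by rw [hbody, List.drop_eq_nil_iff]
      have hjl : istr + 4 + m < cs.length ↔ body ≠ [] := by rw [Ne, hbnil]; omega
      have hdrj : cs.drop (istr + 4 + m) = body := by
        rw [hbody, ← hdd4, List.drop_drop]
      have hgd : cs.getD (istr + 4 + m) ' ' = body.headD ' ' := by
        rw [getD_eq_headD_drop, hdrj]
      have htakeA : cs.take (istr + 4) = lead ++ [c1, c2, c3, c4] := by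
        rw [List.take_add, ← hrest, hr]
        have hti : cs.take istr = lead := by
          rw [histr, hlead]; exact take_takeWhile_len _ _
        rw [hti]
        rfl
      rcases hbcase : body with _ | ⟨b0, r⟩
      · rw [hbcase] at hjl hgd hdrj hbodydef
        have hjge : ¬ (istr + 4 + m < cs.length) := by rw [hjl]; simp
        rw [if_neg (fun h => hjge h.1), if_neg (fun h => hjge h.1),
            if_pos (Or.inr (Or.inl (by omega)))]
        have htlg : tl = gapc := by
          conv_lhs => rw [← List.takeWhile_append_dropWhile (p := fun c => c == ' ') (l := tl)]
          rw [← hgapc, ← hbodydef]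
          simp
        simp [pvRun, pvFinish, htakeA, htlg]
      · rw [hbcase] at hjl hgd hdrj hbodydef
        simp only [List.headD_cons] at hgd
        have hb0 : (b0 == ' ') = false := by
          have h := headD_dropWhile_false (fun c => c == ' ') tl
            (by rw [← hbodydef]; simp)
          rw [← hbodydef] at h
          simpa using h
        have hbne : istr + 4 + m < cs.length := hjl.mpr (by simp)
        by_cases hstar : b0 = '*'
        · rw [if_pos ⟨hbne, by rw [hgd]; exact hstar⟩]
          subst hstar
          have hstepstar : pvRun ⟨lead ++ [c1, c2, c3, c4], gapc, [], 4, .gap⟩ ('*' :: r) =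
              pvRun ⟨lead ++ [c1, c2, c3, c4], gapc, [], 4, .tok⟩ r := by
            simp [pvRun, pvStep]
          rw [hstepstar, run_tok, scan_eq cs (istr + 4 + m + 1)]
          have hdt : cs.drop (istr + 4 + m + 1) = r := by
            have h1 : cs.drop (istr + 4 + m + 1) = (cs.drop (istr + 4 + m)).drop 1 := by
              rw [List.drop_drop]
            rw [h1, hdrj]
            rfl
          rw [hdt]
          simp only [List.nil_append]
          set tokc := r.takeWhile (fun c => !pvIsStop c) with htokc
          set sl := tokc.length with hsl
          have hslice2 : PySem.List.slice cs (some (((istr + 4 + m : Nat) : Int) + 1))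
              (some ((istr + 4 + m + 1 + sl : Nat) : Int)) = r.take sl := by
            have h := PySem.List.slice_natCast_add (xs := cs) (j := istr + 4 + m + 1) (n := sl)
            rw [hdt] at h
            push_cast at h ⊢
            exact h
          rw [hslice2, show r.take sl = tokc from take_takeWhile_len _ _]
          have hdk : cs.drop (istr + 4 + m + 1 + sl) = r.drop sl := by
            rw [← hdt, List.drop_drop]
          have hresid : r.drop sl = r.dropWhile (fun c => !pvIsStop c) :=
            (dropWhile_eq_drop _ _).symm
          rw [hdk, hresid]
          set resid := r.dropWhile (fun c => !pvIsStop c) with hresdef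
          rcases hres : resid with _ | ⟨d, r2⟩
          · by_cases htok : tokc = []
            · rw [if_neg (by simp [htok])]
              simp [pvRun, pvFinish, htok]
            · rw [if_pos (by simp [htok])]
              simp [pvRun, pvFinish, htok, htakeA]
          · rw [hres] at hresdef
            have hd : pvIsStop d = true := by
              have h := headD_dropWhile_false (fun c => !pvIsStop c) r
                (by rw [← hresdef]; simp)
              rw [← hresdef] at h
              simpa using h
            by_cases htok : tokc = []
            · rw [if_neg (by simp [htok])]
              simp [pvRun, pvStep, pvFinish, hd, htok]
            · rw [if_pos (by simp [htok])]
              have hcopy : pvRun ⟨lead ++ [c1, c2, c3, c4], gapc, tokc, 4, .tok⟩ (d :: r2) =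
                  some ⟨lead ++ [c1, c2, c3, c4] ++ "(kind=".toList ++ tokc ++ [')'] ++ [d] ++ r2,
                        gapc, tokc, 4, .copy⟩ := by
                simp [pvRun, pvStep, hd, htok, run_copy]
              rw [hcopy]
              simp [pvFinish, htakeA]
        · by_cases hpar : b0 = '('
          · rw [if_neg (fun h => hstar (by rw [hgd] at h; exact h.2)),
                if_pos ⟨hbne, by rw [hgd]; exact hpar⟩]
            simp [pvRun, pvStep, pvFinish, hpar]
          · rw [if_neg (fun h => hstar (by rw [hgd] at h; exact h.2)),
                if_neg (fun h => hpar (by rw [hgd] at h; exact h.2))]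
            have hgapm : gapc.isEmpty = (m == 0) := by
              rw [hm]; cases gapc <;> simp
            by_cases hdef : 0 < m ∨ b0 = ','
            · rw [if_pos (by
                rcases hdef with h | h
                · exact Or.inl (by omega)
                · exact Or.inr (Or.inr (Or.inr (by rw [hgd]; exact h))))]
              have hcopy : pvRun ⟨lead ++ [c1, c2, c3, c4], gapc, [], 4, .gap⟩ (b0 :: r) =
                  some ⟨lead ++ [c1, c2, c3, c4] ++ "(kind=8)".toList ++ gapc ++ [b0] ++ r,
                        gapc, [], 4, .copy⟩ := by
                have hcond : (!gapc.isEmpty || b0 == ',') = true := by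
                  rcases hdef with h | h
                  · rw [hgapm]; simp; omega
                  · simp [h]
                simp [pvRun, pvStep, hb0, hcond, run_copy,
                  show (b0 == '*') = false by simpa using hstar,
                  show (b0 == '(') = false by simpa using hpar]
              rw [hcopy]
              have htlg : tl = gapc ++ (b0 :: r) := by
                conv_lhs => rw [← List.takeWhile_append_dropWhile (p := fun c => c == ' ') (l := tl)]
                rw [← hgapc, ← hbodydef]
              simp [pvFinish, htakeA, htlg]
            · push Not at hdef
              obtain ⟨hm0, hcomma⟩ := hdef
              rw [if_neg (by
                push Not
                refine ⟨by omega, by omega, ?_, ?_⟩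
                · rw [hgd]; simpa using hb0
                · rw [hgd]; exact hcomma)]
              have hgempty : gapc.isEmpty = true := by rw [hgapm]; simpa using by omega
              simp [pvRun, pvStep, pvFinish, hb0, hgempty,
                show (b0 == '*') = false by simpa using hstar,
                show (b0 == '(') = false by simpa using hpar,
                show (b0 == ',') = false by simpa using hcomma]
    · rw [if_pos hreal]
      rw [hreal4] at hreal
      simp only [PySem.Chars.lower, List.map_cons, List.map_nil, List.cons.injEq,
        and_true, not_and] at hreal
      by_cases h1 : PySem.Chars.lowerChar c1 = 'r' <;>
        by_cases h2 : PySem.Chars.lowerChar c2 = 'e' <;>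
          by_cases h3 : PySem.Chars.lowerChar c3 = 'a' <;>
            by_cases h4 : PySem.Chars.lowerChar c4 = 'l' <;>
              first
                | (exact absurd h4 (hreal h1 h2 h3))
                | simp [pvRun, pvStep, pvStepKw, pvFinish, pvPat, ha, h1, h2, h3, h4]
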